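-- pv_equiv track=rewrite | github.com/pts-briangeng/list_loading_service | app/services/readers.py | count
-- ===== SOURCE A (Python) =====
-- def count(descriptor=None, max_limit_count=1):
--     index = 0
--     for index, row in enumerate(descriptor, start=1):
--         if index <= max_limit_count:
--             continue
--         else:
--             break
--     return index < (max_limit_count - 1)
-- ===== SOURCE B (Python) =====
-- def count(descriptor=None, max_limit_count=1):
--     # Exhaust the iterable completely and compare its total length to the limit.
--     # Correct because A's bounded index (capped at max_limit_count + 1) is below
--     # max_limit_count - 1 exactly when the full length is: whenever the cap bites,
--     # both sides of the comparison are False. Note: unlike A, this consumes the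
--     # whole iterator (return value is identical).
--     return len(list(descriptor)) < max_limit_count - 1
-- ===== Notes on version B (the rewrite author's own statement) =====
-- stated objective: simpler
-- what changed: Drops A's bounded early-exit enumerate/continue/break loop entirely: B materializes the iterable once and compares its full length to max_limit_count - 1, which provably gives the same boolean on every input (when A's cap bites, both comparisons are False).
import Mathlib
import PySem

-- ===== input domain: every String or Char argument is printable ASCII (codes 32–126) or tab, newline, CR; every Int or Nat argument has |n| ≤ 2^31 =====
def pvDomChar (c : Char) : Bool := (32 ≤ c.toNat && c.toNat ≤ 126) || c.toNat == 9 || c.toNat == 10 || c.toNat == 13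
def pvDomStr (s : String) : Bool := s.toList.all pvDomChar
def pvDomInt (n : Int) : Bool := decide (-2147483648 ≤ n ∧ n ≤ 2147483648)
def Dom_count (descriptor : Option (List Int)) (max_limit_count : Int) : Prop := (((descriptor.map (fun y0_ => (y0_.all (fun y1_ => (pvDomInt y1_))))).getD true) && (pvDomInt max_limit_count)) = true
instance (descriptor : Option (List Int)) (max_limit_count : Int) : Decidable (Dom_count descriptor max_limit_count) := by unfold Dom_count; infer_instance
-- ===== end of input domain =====

-- B drops A's bounded early-exit loop and compares the FULL length to the limit
-- (provably the same boolean; simpler). Return value only: B consumes the whole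
-- iterable where A stops early. Both raise TypeError on descriptor=None (Pre_).

-- ===== PORT A =====
-- for index, row in enumerate(descriptor, start=1): if index <= m: continue else: break
def countLoop (m : Int) : List (Int × Int) → Int → Int
  | [], idx => idx
  | (i, _) :: rest, _ => if i ≤ m then countLoop m rest i else i

def count (descriptor : Option (List Int)) (max_limit_count : Int) : Bool :=
  match descriptor with
  | none => false   -- Python raises TypeError here; excluded by Pre_count
  | some xs =>
      decide (countLoop max_limit_count (PySem.List.enumerate xs 1) 0 < max_limit_count - 1)

-- ===== PORT B =====
-- return len(list(descriptor)) < max_limit_count - 1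
def count_alt (descriptor : Option (List Int)) (max_limit_count : Int) : Bool :=
  match descriptor with
  | none => false   -- Python raises TypeError here; excluded by Pre_count
  | some xs => decide ((xs.length : Int) < max_limit_count - 1)

-- ===== PRECONDITION & SPEC =====
-- A (and B) raise TypeError when descriptor is None; nothing else is excluded.
def Pre_count (descriptor : Option (List Int)) (_max_limit_count : Int) : Prop :=
  descriptor ≠ none
instance (descriptor : Option (List Int)) (max_limit_count : Int) : Decidable (Pre_count descriptor max_limit_count) := by unfold Pre_count; infer_instance
def pvWitness_count : Option (List Int) × Int := (some [1, 2, 3], 1)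

def Spec_count (descriptor : Option (List Int)) (max_limit_count : Int) (out : Bool) : Prop := out = count_alt descriptor max_limit_count
instance (descriptor : Option (List Int)) (max_limit_count : Int) (out : Bool) : Decidable (Spec_count descriptor max_limit_count out) := by unfold Spec_count; infer_instance

-- ===== CLAIM (what is proved, stated in full; the proofs are below) =====
def Claim_equal_count : Prop := ∀ (descriptor : Option (List Int)) (max_limit_count : Int), Dom_count descriptor max_limit_count → Pre_count descriptor max_limit_count → Spec_count descriptor max_limit_count (count descriptor max_limit_count)

-- ===== LEMMAS AND PROOFS =====

-- A's loop value: 0 on the empty list, otherwise min (s-1+len) (max (m+1) s)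
-- when enumeration starts at s.
theorem countLoop_enumerate (m : Int) (xs : List Int) (s idx : Int) :
    countLoop m (PySem.List.enumerate xs s) idx =
      if xs = [] then idx else min (s - 1 + xs.length) (max (m + 1) s) := by
  induction xs generalizing s idx with
  | nil => simp [PySem.List.enumerate_nil, countLoop]
  | cons x rest ih =>
      simp only [PySem.List.enumerate_cons, countLoop]
      by_cases h : s ≤ m
      · rw [ih]
        by_cases hr : rest = [] <;> simp [hr] <;> omega
      · simp only [if_neg h]
        simp
        omega

-- ===== VERDICT (by name: the statement is the Claim_ definition above) =====
theorem count_spec : Claim_equal_count := by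
  intro descriptor m _ hpre
  unfold Spec_count
  match descriptor with
  | none => exact absurd rfl hpre
  | some xs =>
      simp only [count, count_alt]
      rw [countLoop_enumerate]
      by_cases h : xs = []
      · simp [h]
      · simp only [if_neg h, decide_eq_decide]
        have hlen : 0 < xs.length := List.length_pos_iff.mpr h
        omega
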